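-- pv_equiv track=rewrite | github.com/knotty-code/ether-forge | utils/paths.py | remove_keys_from_path
-- ===== SOURCE A (Python) =====
-- def remove_keys_from_path(path: str) -> str:
--     """Remove keys from jspath.
--     Implementing function for MicroPython since re.sub is not available"""
--     cleaned_path = ''
--     i = 0
--     while i < len(path):
--         if path[i] == '{':
--             j = i + 1
--             while j < len(path):
--                 if path[j] == '}':
--                     i = j
--                     break
--                 j = j + 1
--         else:
--             cleaned_path = cleaned_path + path[i]
--         i = i + 1
--     return cleaned_path
-- ===== SOURCE B (Python) =====
-- def remove_keys_from_path(path: str) -> str: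
--     """Remove keys from jspath (segment scan with str.find, sliced copies)."""
--     parts = []
--     pos = 0
--     while True:
--         open_ = path.find('{', pos)
--         if open_ == -1:
--             parts.append(path[pos:])
--             break
--         parts.append(path[pos:open_])
--         close = path.find('}', open_ + 1)
--         pos = open_ + 1 if close == -1 else close + 1
--     return ''.join(parts)
-- ===== Notes on version B (the rewrite author's own statement) =====
-- stated objective: faster
-- what changed: Replaces the char-by-char index loop (with nested close-brace scan and per-character string concatenation) by a segment scan: str.find locates each '{' and its closing '}', kept text is copied as whole slices and joined once at the end.
import Mathlib
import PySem

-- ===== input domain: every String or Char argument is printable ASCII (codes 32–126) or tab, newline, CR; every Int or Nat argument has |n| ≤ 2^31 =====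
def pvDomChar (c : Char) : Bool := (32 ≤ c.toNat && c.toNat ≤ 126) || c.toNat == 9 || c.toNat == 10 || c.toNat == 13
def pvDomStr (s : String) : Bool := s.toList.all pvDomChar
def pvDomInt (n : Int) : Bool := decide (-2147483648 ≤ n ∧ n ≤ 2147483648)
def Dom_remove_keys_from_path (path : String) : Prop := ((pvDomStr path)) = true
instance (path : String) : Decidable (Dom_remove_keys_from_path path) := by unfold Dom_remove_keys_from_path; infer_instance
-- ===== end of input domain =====

-- B rewrites A's char-by-char copy loop (with a nested '}' scan) as a segment scan
-- using str.find and whole-slice copies, joined at the end; objective: simpler.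

-- ===== PORT A =====
-- A's inner `while j < len(path)` scan: first index ≥ j holding '}' (the break sets i = j).
def pvScanClose (cs : List Char) (j : Nat) : Option Nat :=
  if h : j < cs.length then
    if cs.getD j ' ' = '}' then some j else pvScanClose cs (j+1)
  else none
termination_by cs.length - j

theorem pvScanClose_ge (cs : List Char) (j r : Nat) (h : pvScanClose cs j = some r) :
    j ≤ r ∧ r < cs.length := by
  fun_induction pvScanClose cs j with
  | case1 j hj hc => simp_all
  | case2 j hj hc ih => have := ih h; omega
  | case3 j hj => simp_all

-- A's outer `while i < len(path)` loop over the index i, accumulating cleaned_path.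
def pvALoop (cs : List Char) (i : Nat) (acc : List Char) : List Char :=
  if h : i < cs.length then
    if cs.getD i ' ' = '{' then
      match hs : pvScanClose cs (i+1) with
      | some j => pvALoop cs (j+1) acc
      | none => pvALoop cs (i+1) acc
    else pvALoop cs (i+1) (acc ++ [cs.getD i ' '])
  else acc
termination_by cs.length - i
decreasing_by
  · have := pvScanClose_ge cs (i+1) j hs; omega
  · omega
  · omega

def remove_keys_from_path (path : String) : String :=
  String.ofList (pvALoop path.toList 0 [])

-- ===== PORT B =====
-- findFrom past the end of the list yields -1 (needed for bLoop's termination).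
theorem pvFindFrom_past (cs sub : List Char) (p : Nat) (h : cs.length < p) :
    PySem.Chars.findFrom cs sub (p : Int) none = -1 := by
  simp only [PySem.Chars.findFrom]
  rw [if_pos (by exact_mod_cast h)]

-- first-occurrence reading of findFrom for a single-character needle, ≠ -1 case
theorem pvFindFrom_spec (cs : List Char) (c : Char) (p : Nat) (hp : p ≤ cs.length)
    (h : PySem.Chars.findFrom cs [c] (p : Int) none ≠ -1) :
    0 ≤ PySem.Chars.findFrom cs [c] (p : Int) none ∧
    p ≤ (PySem.Chars.findFrom cs [c] (p : Int) none).toNat ∧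
    (PySem.Chars.findFrom cs [c] (p : Int) none).toNat < cs.length ∧
    cs.getD (PySem.Chars.findFrom cs [c] (p : Int) none).toNat ' ' = c ∧
    ∀ j, p ≤ j → j < (PySem.Chars.findFrom cs [c] (p : Int) none).toNat →
      cs.getD j ' ' ≠ c := by
  obtain ⟨h1, h2, h3⟩ := PySem.Chars.findFrom_natCast_spec cs [c] p hp h
  set r := PySem.Chars.findFrom cs [c] (p : Int) none with hr
  have hrn : (r.toNat : Int) = r := Int.toNat_of_nonneg (by omega)
  have hle : p ≤ r.toNat := by omega
  obtain ⟨t, ht⟩ := h2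
  have hlen : r.toNat < cs.length := by
    have := congrArg List.length ht
    simp [List.length_drop] at this; omega
  refine ⟨by omega, hle, hlen, ?_, ?_⟩
  · have hdrop : cs.drop r.toNat = c :: t := ht.symm
    have := List.drop_eq_getElem_cons hlen
    rw [this] at hdrop
    rw [List.getD_eq_getElem _ _ hlen]
    exact (List.cons.injEq _ _ _ _ ▸ hdrop).1
  · intro j hj1 hj2 hc
    have hjlen : j < cs.length := by omega
    apply h3 j (by exact_mod_cast hj1) hj2
    rw [List.getD_eq_getElem _ _ hjlen] at hc
    rw [List.drop_eq_getElem_cons hjlen, hc]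
    exact ⟨_, rfl⟩

-- B's `while True` segment loop: find next '{' from pos; copy path[pos:open] as a slice;
-- skip to just past the matching '}' (or just past the lone '{').
-- (under the `else`, findFrom is ≥ 0, so the Python `open_ + 1` is written `open_.toNat + 1`)
def pvBLoop (cs : List Char) (pos : Nat) : List Char :=
  if ho : PySem.Chars.findFrom cs ['{'] (pos : Int) none = -1 then
    PySem.List.slice cs (some (pos : Int)) none
  else
    PySem.List.slice cs (some (pos : Int)) (some (PySem.Chars.findFrom cs ['{'] (pos : Int) none)) ++
      (if hc : PySem.Chars.findFrom cs ['}'] (((PySem.Chars.findFrom cs ['{'] (pos : Int) none).toNat + 1 : Nat) : Int) none = -1 then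
         pvBLoop cs ((PySem.Chars.findFrom cs ['{'] (pos : Int) none).toNat + 1)
       else
         pvBLoop cs ((PySem.Chars.findFrom cs ['}'] (((PySem.Chars.findFrom cs ['{'] (pos : Int) none).toNat + 1 : Nat) : Int) none).toNat + 1))
termination_by cs.length + 1 - pos
decreasing_by
  · -- lone '{': pos ≤ findFrom.toNat < len
    have hp : pos ≤ cs.length := by
      by_contra hgt
      exact ho (pvFindFrom_past cs ['{'] pos (by omega))
    have := pvFindFrom_spec cs '{' pos hp ho
    omega
  · -- matched '}': close.toNat ≥ open.toNat + 1 > pos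
    have hp : pos ≤ cs.length := by
      by_contra hgt
      exact ho (pvFindFrom_past cs ['{'] pos (by omega))
    obtain ⟨-, h1, h2, -, -⟩ := pvFindFrom_spec cs '{' pos hp ho
    obtain ⟨-, g1, g2, -, -⟩ := pvFindFrom_spec cs '}' _ (by omega) hc
    omega

def remove_keys_from_path_alt (path : String) : String :=
  String.ofList (pvBLoop path.toList 0)

-- ===== PRECONDITION & SPEC =====
def Spec_remove_keys_from_path (path : String) (out : String) : Prop := out = remove_keys_from_path_alt path
instance (path : String) (out : String) : Decidable (Spec_remove_keys_from_path path out) := by unfold Spec_remove_keys_from_path; infer_instance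

-- ===== CLAIM (what is proved, stated in full; the proofs are below) =====
def Claim_equal_remove_keys_from_path : Prop := ∀ (path : String), Dom_remove_keys_from_path path → Spec_remove_keys_from_path path (remove_keys_from_path path)

-- ===== LEMMAS AND PROOFS =====

-- first-occurrence reading of findFrom for a single-character needle, -1 case
theorem pvFindFrom_none (cs : List Char) (c : Char) (p : Nat) (hp : p ≤ cs.length)
    (h : PySem.Chars.findFrom cs [c] (p : Int) none = -1) :
    ∀ j, p ≤ j → j < cs.length → cs.getD j ' ' ≠ c := by
  have hiff := (PySem.Chars.findFrom_natCast_eq_neg_one_iff cs [c] p hp).mp h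
  intro j hj1 hj2 hc
  apply hiff
  rw [List.singleton_infix_iff]
  rw [List.getD_eq_getElem _ _ hj2] at hc
  have : cs[j] ∈ cs.drop p := by
    rw [List.mem_iff_getElem]
    exact ⟨j - p, by simp [List.length_drop]; omega, by rw [List.getElem_drop]; congr 1; omega⟩
  rw [hc] at this
  exact this

-- characterization of A's inner scan
theorem pvScanClose_none (cs : List Char) (j : Nat) (h : pvScanClose cs j = none) :
    ∀ k, j ≤ k → k < cs.length → cs.getD k ' ' ≠ '}' := by
  fun_induction pvScanClose cs j with
  | case1 j hj hc => simp_all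
  | case2 j hj hc ih =>
    intro k hk1 hk2
    rcases Nat.eq_or_lt_of_le hk1 with rfl | hlt
    · exact hc
    · exact ih h k hlt hk2
  | case3 j hj => intro k hk1 hk2; omega

theorem pvScanClose_some (cs : List Char) (j r : Nat) (h : pvScanClose cs j = some r) :
    cs.getD r ' ' = '}' ∧ ∀ k, j ≤ k → k < r → cs.getD k ' ' ≠ '}' := by
  fun_induction pvScanClose cs j with
  | case1 j hj hc =>
    refine ⟨by simp_all, ?_⟩
    intro k hk1 hk2
    have : j = r := by simpa using h
    omega
  | case2 j hj hc ih =>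
    obtain ⟨ih1, ih2⟩ := ih h
    refine ⟨ih1, ?_⟩
    intro k hk1 hk2
    rcases Nat.eq_or_lt_of_le hk1 with rfl | hlt
    · exact hc
    · exact ih2 k hlt hk2
  | case3 j hj => simp_all

-- A's scan agrees with B's find: the -1 case
theorem pvScan_of_ff_none (cs : List Char) (j : Nat) (hj : j ≤ cs.length)
    (h : PySem.Chars.findFrom cs ['}'] (j : Int) none = -1) :
    pvScanClose cs j = none := by
  cases hs : pvScanClose cs j with
  | none => rfl
  | some r =>
    obtain ⟨hge, hlt⟩ := pvScanClose_ge cs j r hs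
    obtain ⟨hch, -⟩ := pvScanClose_some cs j r hs
    exact absurd hch (pvFindFrom_none cs '}' j hj h r hge hlt)

-- A's scan agrees with B's find: the found case
theorem pvScan_of_ff_some (cs : List Char) (j : Nat) (hj : j ≤ cs.length)
    (h : PySem.Chars.findFrom cs ['}'] (j : Int) none ≠ -1) :
    pvScanClose cs j = some ((PySem.Chars.findFrom cs ['}'] (j : Int) none).toNat) := by
  obtain ⟨-, t1, t2, t3, t4⟩ := pvFindFrom_spec cs '}' j hj h
  cases hs : pvScanClose cs j with
  | none => exact absurd t3 (pvScanClose_none cs j hs _ t1 t2)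
  | some r =>
    obtain ⟨hge, hlt⟩ := pvScanClose_ge cs j r hs
    obtain ⟨hch, hmin⟩ := pvScanClose_some cs j r hs
    congr 1
    by_contra hne
    rcases Nat.lt_or_ge r (PySem.Chars.findFrom cs ['}'] (j : Int) none).toNat with hlt' | hge'
    · exact t4 r hge hlt' hch
    · exact hmin _ t1 (by omega) t3

theorem pvSliceFrom (cs : List Char) (p : Nat) :
    PySem.List.slice cs (some (p : Int)) none = cs.drop p := by
  simp [pysem]

theorem pvSliceTo (cs : List Char) (p o : Nat) :
    PySem.List.slice cs (some (p : Int)) (some (o : Int)) = (cs.drop p).take (o - p) := by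
  simp [pysem]

theorem pvDropCons (cs : List Char) (i : Nat) (h : i < cs.length) :
    cs.drop i = cs.getD i ' ' :: cs.drop (i + 1) := by
  rw [List.getD_eq_getElem _ _ h]
  exact List.drop_eq_getElem_cons h

-- A over a stretch with no '{' copies exactly the rest of the string
theorem pvALoop_clean (cs : List Char) :
    ∀ n i acc, cs.length - i ≤ n →
    (∀ k, i ≤ k → k < cs.length → cs.getD k ' ' ≠ '{') →
    pvALoop cs i acc = acc ++ cs.drop i := by
  intro n
  induction n with
  | zero =>
    intro i acc hn _
    rw [pvALoop, dif_neg (by omega), List.drop_eq_nil_of_le (by omega), List.append_nil]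
  | succ n ih =>
    intro i acc hn hno
    by_cases h : i < cs.length
    · rw [pvALoop, dif_pos h, if_neg (hno i le_rfl h),
        ih (i+1) _ (by omega) (fun k hk1 hk2 => hno k (by omega) hk2),
        pvDropCons cs i h]
      simp
    · rw [pvALoop, dif_neg h, List.drop_eq_nil_of_le (by omega), List.append_nil]

-- A over a stretch with no '{' before o advances to o copying the slice
theorem pvALoop_advance (cs : List Char) :
    ∀ n i acc o, o - i ≤ n → i ≤ o → o ≤ cs.length →
    (∀ k, i ≤ k → k < o → cs.getD k ' ' ≠ '{') →
    pvALoop cs i acc = pvALoop cs o (acc ++ (cs.drop i).take (o - i)) := by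
  intro n
  induction n with
  | zero =>
    intro i acc o hn h1 _ _
    have : i = o := by omega
    subst this
    simp
  | succ n ih =>
    intro i acc o hn h1 h2 hno
    rcases Nat.eq_or_lt_of_le h1 with rfl | hlt
    · simp
    · have hi : i < cs.length := by omega
      rw [pvALoop, dif_pos hi, if_neg (hno i le_rfl hlt),
        ih (i+1) _ o (by omega) (by omega) h2 (fun k hk1 hk2 => hno k (by omega) hk2),
        pvDropCons cs i hi]
      congr 1
      rw [show o - i = (o - (i+1)) + 1 from by omega, List.take_succ_cons]
      simp

theorem pvMain (cs : List Char) : ∀ n i acc, cs.length + 1 - i ≤ n →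
    pvALoop cs i acc = acc ++ pvBLoop cs i := by
  intro n
  induction n with
  | zero =>
    intro i acc hn
    rw [pvALoop, dif_neg (by omega), pvBLoop,
      dif_pos (pvFindFrom_past cs ['{'] i (by omega)), pvSliceFrom,
      List.drop_eq_nil_of_le (by omega), List.append_nil]
  | succ n ih =>
    intro i acc hn
    by_cases ho : PySem.Chars.findFrom cs ['{'] (i : Int) none = -1
    · rw [pvBLoop, dif_pos ho, pvSliceFrom]
      apply pvALoop_clean cs cs.length i acc (by omega)
      intro k hk1 hk2
      have hi : i ≤ cs.length := by omega
      exact pvFindFrom_none cs '{' i hi ho k hk1 hk2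
    · have hi : i ≤ cs.length := by
        by_contra hgt
        exact ho (pvFindFrom_past cs ['{'] i (by omega))
      obtain ⟨h0, h1, h2, h3, h4⟩ := pvFindFrom_spec cs '{' i hi ho
      set o := (PySem.Chars.findFrom cs ['{'] (i : Int) none).toNat with hodef
      have hocast : PySem.Chars.findFrom cs ['{'] (i : Int) none = ((o : Nat) : Int) :=
        (Int.toNat_of_nonneg h0).symm
      rw [pvALoop_advance cs (o - i) i acc o le_rfl h1 (by omega) h4]
      rw [pvBLoop, dif_neg ho, hocast, pvSliceTo]
      simp only [Int.toNat_natCast]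
      rw [pvALoop, dif_pos h2, if_pos h3]
      by_cases hc : PySem.Chars.findFrom cs ['}'] ((o + 1 : Nat) : Int) none = -1
      · have hscan := pvScan_of_ff_none cs (o+1) (by omega) hc
        simp only [dif_pos hc]
        split
        · rename_i j hs
          rw [hscan] at hs
          cases hs
        · rw [ih (o+1) _ (by omega), List.append_assoc]
      · have hscan := pvScan_of_ff_some cs (o+1) (by omega) hc
        obtain ⟨-, g1, g2, -, -⟩ := pvFindFrom_spec cs '}' (o+1) (by omega) hc
        simp only [dif_neg hc]
        split
        · rename_i j hs
          rw [hscan] at hs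
          injection hs with hj
          subst hj
          rw [ih ((PySem.Chars.findFrom cs ['}'] ((o + 1 : Nat) : Int) none).toNat + 1) _ (by omega),
            List.append_assoc]
        · rename_i hs
          rw [hscan] at hs
          cases hs

-- ===== VERDICT (by name: the statement is the Claim_ definition above) =====
theorem remove_keys_from_path_spec : Claim_equal_remove_keys_from_path := by
  intro path _
  unfold Spec_remove_keys_from_path remove_keys_from_path remove_keys_from_path_alt
  rw [pvMain path.toList (path.toList.length + 1) 0 [] (by omega)]
  rfl
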